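-- pv_equiv track=rewrite | github.com/rhizome-lab/moss | src/moss/gen/grpc.py | python_type_to_proto
-- ===== SOURCE A (Python) =====
-- PROTO_TYPE_MAP = {
--     "str": "string",
--     "int": "int64",
--     "float": "double",
--     "bool": "bool",
--     "Path": "string",
--     "list[str]": "repeated string",
--     "list[int]": "repeated int64",
--     "dict": "google.protobuf.Struct",
--     "Any": "google.protobuf.Value",
-- }
--
-- def python_type_to_proto(type_hint: str) -> str:
--     """Convert Python type hint to proto type."""
--     # Handle common types
--     if type_hint in PROTO_TYPE_MAP:
--         return PROTO_TYPE_MAP[type_hint]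
--
--     # Handle Path variants
--     if "Path" in type_hint:
--         return "string"
--
--     # Handle list types
--     if type_hint.startswith("list["):
--         inner = type_hint[5:-1]
--         inner_proto = python_type_to_proto(inner)
--         return f"repeated {inner_proto}"
--
--     # Handle optional types
--     if type_hint.startswith("Optional[") or " | None" in type_hint:
--         clean = type_hint.replace("Optional[", "").replace("]", "").replace(" | None", "")
--         return python_type_to_proto(clean)
--
--     # Default to string for complex types
--     return "string"
-- ===== SOURCE B (Python) =====
-- PROTO_TYPE_MAP = {
--     "str": "string",
--     "int": "int64",
--     "float": "double",
--     "bool": "bool",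
--     "Path": "string",
--     "list[str]": "repeated string",
--     "list[int]": "repeated int64",
--     "dict": "google.protobuf.Struct",
--     "Any": "google.protobuf.Value",
-- }
--
--
-- def _terminal(t):
--     """Base proto type if t is terminal under A's first two rules, else None."""
--     if t in PROTO_TYPE_MAP:
--         return PROTO_TYPE_MAP[t]
--     if "Path" in t:
--         return "string"
--     return None
--
--
-- def _rewrite(t):
--     """One rewrite step: (prefix contributed, new hint), or None if no rule applies."""
--     if t.startswith("list["):
--         return ("repeated ", t[5:-1])
--     if t.startswith("Optional[") or " | None" in t:
--         return ("", t.replace("Optional[", "").replace("]", "").replace(" | None", ""))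
--     return None
--
--
-- def python_type_to_proto(type_hint: str) -> str:
--     """Convert Python type hint to proto type (small-step rewrite machine)."""
--     prefix, t = "", type_hint
--     while True:
--         base = _terminal(t)
--         if base is not None:
--             return prefix + base
--         step = _rewrite(t)
--         if step is None:
--             return prefix + "string"
--         prefix += step[0]
--         t = step[1]
-- ===== Notes on version B (the rewrite author's own statement) =====
-- stated objective: alternative
-- what changed: Replaces A's monolithic non-tail recursion with a small-step rewrite machine: a terminal classifier and a one-step rewriter (returning an optional prefix/new-hint pair) driven by an iterative loop that accumulates the output prefix.
import Mathlib
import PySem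

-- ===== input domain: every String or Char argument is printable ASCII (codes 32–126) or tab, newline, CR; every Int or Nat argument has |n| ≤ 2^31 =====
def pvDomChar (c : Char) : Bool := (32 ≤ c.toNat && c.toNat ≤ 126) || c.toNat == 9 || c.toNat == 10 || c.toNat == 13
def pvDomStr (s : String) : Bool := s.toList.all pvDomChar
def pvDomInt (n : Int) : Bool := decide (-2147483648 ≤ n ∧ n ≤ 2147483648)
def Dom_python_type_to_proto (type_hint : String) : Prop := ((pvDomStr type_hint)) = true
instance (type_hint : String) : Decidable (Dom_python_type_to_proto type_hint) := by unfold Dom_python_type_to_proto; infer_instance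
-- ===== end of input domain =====

-- B restructures A's monolithic recursion as a small-step rewrite machine (terminal classifier +
-- one-step rewriter + iterative driver with a prefix accumulator); objective: alternative decomposition.

-- ===== PORT A =====
-- PROTO_TYPE_MAP, shared module constant of both Python files
def protoTypeMap : PySem.Dict (List Char) (List Char) :=
  PySem.Dict.mk [("str".toList, "string".toList), ("int".toList, "int64".toList),
    ("float".toList, "double".toList), ("bool".toList, "bool".toList),
    ("Path".toList, "string".toList), ("list[str]".toList, "repeated string".toList),
    ("list[int]".toList, "repeated int64".toList), ("dict".toList, "google.protobuf.Struct".toList),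
    ("Any".toList, "google.protobuf.Value".toList)]

-- A's recursion, step for step; the Nat fuel (call depth, ≤ length of the hint) is a totality guard only
def pyACore : Nat → List Char → List Char
  | 0, _ => "string".toList
  | fuel + 1, s =>
    match protoTypeMap.get? s with
    | some v => v
    | none =>
      if PySem.Chars.isIn "Path".toList s then "string".toList
      else if PySem.Chars.startswith s "list[".toList then
        "repeated ".toList ++ pyACore fuel (PySem.Chars.slice s (some 5) (some (-1)))
      else if PySem.Chars.startswith s "Optional[".toList || PySem.Chars.isIn " | None".toList s then
        pyACore fuel
          (PySem.Chars.replace (PySem.Chars.replace (PySem.Chars.replace s "Optional[".toList [])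
            "]".toList []) " | None".toList [])
      else "string".toList

def python_type_to_proto (type_hint : String) : String :=
  String.ofList (pyACore (type_hint.toList.length + 1) type_hint.toList)

-- ===== PORT B =====
-- Source B's _terminal: base proto type if t is terminal, else none
def pyBTerminal (t : List Char) : Option (List Char) :=
  match protoTypeMap.get? t with
  | some v => some v
  | none => if PySem.Chars.isIn "Path".toList t then some ("string".toList) else none

-- Source B's _rewrite: one rewrite step, (contributed prefix, new hint), or none
def pyBRewrite (t : List Char) : Option (List Char × List Char) :=
  if PySem.Chars.startswith t "list[".toList then
    some ("repeated ".toList, PySem.Chars.slice t (some 5) (some (-1)))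
  else if PySem.Chars.startswith t "Optional[".toList || PySem.Chars.isIn " | None".toList t then
    some ([], PySem.Chars.replace (PySem.Chars.replace (PySem.Chars.replace t "Optional[".toList [])
      "]".toList []) " | None".toList [])
  else none

-- Source B's driver while-loop; same fuel-style totality guard
def pyBDrive : Nat → List Char → List Char → List Char
  | 0, pre, _ => pre ++ "string".toList
  | fuel + 1, pre, t =>
    match pyBTerminal t with
    | some base => pre ++ base
    | none =>
      match pyBRewrite t with
      | none => pre ++ "string".toList
      | some (p, t') => pyBDrive fuel (pre ++ p) t'

def python_type_to_proto_alt (type_hint : String) : String :=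
  String.ofList (pyBDrive (type_hint.toList.length + 1) [] type_hint.toList)

-- ===== PRECONDITION & SPEC =====
def Spec_python_type_to_proto (type_hint : String) (out : String) : Prop := out = python_type_to_proto_alt type_hint
instance (type_hint : String) (out : String) : Decidable (Spec_python_type_to_proto type_hint out) := by unfold Spec_python_type_to_proto; infer_instance

-- ===== CLAIM (what is proved, stated in full; the proofs are below) =====
def Claim_equal_python_type_to_proto : Prop := ∀ (type_hint : String), Dom_python_type_to_proto type_hint → Spec_python_type_to_proto type_hint (python_type_to_proto type_hint)

-- ===== LEMMAS AND PROOFS =====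
-- machine invariant: the driver with accumulator `pre` computes `pre ++` A's recursion, at equal fuel
lemma pyBDrive_eq (fuel : Nat) : ∀ (pre t : List Char), pyBDrive fuel pre t = pre ++ pyACore fuel t := by
  induction fuel with
  | zero => intro pre t; rfl
  | succ n ih =>
    intro pre t
    simp only [pyBDrive, pyBTerminal, pyBRewrite, pyACore]
    cases protoTypeMap.get? t with
    | some v => rfl
    | none =>
      split_ifs with h1 h2 h3 <;> simp [ih, List.append_assoc]

-- ===== VERDICT (by name: the statement is the Claim_ definition above) =====
theorem python_type_to_proto_spec : Claim_equal_python_type_to_proto := by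
  intro t _
  unfold Spec_python_type_to_proto python_type_to_proto python_type_to_proto_alt
  rw [pyBDrive_eq, List.nil_append]
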